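-- pv_equiv track=rewrite | github.com/raeez/chiral-bar-cobar | compute/scripts/compute_bar_cohomology.py | motzkin_differences
-- ===== SOURCE A (Python) =====
-- def motzkin_differences(max_n):
--     """Motzkin differences M(n+1) - M(n) for n = 1, 2, ...
--
--     Ground truth for Virasoro bar cohomology.
--     """
--     # Motzkin numbers: M(0)=1, M(1)=1, M(2)=2, M(3)=4, M(4)=9, ...
--     N = max_n + 5
--     M = [0] * N
--     M[0] = 1
--     M[1] = 1
--     for i in range(2, N):
--         M[i] = M[i-1] + sum(M[k] * M[i-2-k] for k in range(i-1))
--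
--     return {n: M[n+1] - M[n] for n in range(1, max_n + 1)}
-- ===== SOURCE B (Python) =====
-- def motzkin_differences(max_n):
--     """Motzkin differences M(n+1) - M(n) for n = 1, 2, ...
--
--     Uses the linear three-term Motzkin recurrence
--         (n + 3) * M(n+1) = (2*n + 3) * M(n) + 3*n * M(n-1)
--     keeping only the two most recent Motzkin numbers (O(n) total work).
--     """
--     res = {}
--     a, b = 1, 1  # the two most recent Motzkin numbers M(n-1), M(n)
--     for n in range(1, max_n + 1):
--         c = ((2 * n + 3) * b + 3 * n * a) // (n + 3)
--         res[n] = c - b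
--         a, b = b, c
--     return res
-- ===== Notes on version B (the rewrite author's own statement) =====
-- stated objective: faster
-- what changed: Replaces the quadratic convolution table (each M[i] summed from all earlier products) by the linear three-term Motzkin recurrence (n+3)M(n+1)=(2n+3)M(n)+3n*M(n-1), keeping only two running values and emitting each difference in the same pass.
import Mathlib
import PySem

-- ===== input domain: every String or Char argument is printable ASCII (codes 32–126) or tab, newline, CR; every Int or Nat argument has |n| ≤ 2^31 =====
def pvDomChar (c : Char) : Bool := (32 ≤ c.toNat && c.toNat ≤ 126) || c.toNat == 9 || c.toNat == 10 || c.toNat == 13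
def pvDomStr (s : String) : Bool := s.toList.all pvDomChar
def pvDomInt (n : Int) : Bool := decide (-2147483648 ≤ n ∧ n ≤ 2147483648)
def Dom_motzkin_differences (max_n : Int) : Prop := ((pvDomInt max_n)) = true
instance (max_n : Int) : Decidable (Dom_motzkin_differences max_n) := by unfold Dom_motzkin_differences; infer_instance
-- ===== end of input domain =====

-- B replaces A's quadratic convolution table by the linear three-term Motzkin
-- recurrence (n+3)M(n+1) = (2n+3)M(n) + 3n·M(n-1), keeping two running values (objective: faster).

-- ===== PORT A =====
-- Transliteration of A.  [0]*N is List.replicate N.toNat 0 (empty for N < 0, as in Python);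
-- the element assignments M[0]=1, M[1]=1, M[i]=… use pySetD, exact where the index is in
-- range — under Pre_ (max_n ≥ -3) every index A touches is in range (otherwise A raises).
def motzkin_differences (max_n : Int) : List (Int × Int) :=
  let N : Int := max_n + 5
  let M : List Int := List.replicate N.toNat 0
  let M := PySem.List.pySetD M 0 1
  let M := PySem.List.pySetD M 1 1
  let M := (PySem.List.pyRange 2 N 1).foldl (fun M i =>
      PySem.List.pySetD M i
        (PySem.List.pyGetD M (i-1) 0 +
          (PySem.List.pyRange 0 (i-1) 1).foldl
            (fun s k => s + PySem.List.pyGetD M k 0 * PySem.List.pyGetD M (i-2-k) 0) 0)) M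
  (PySem.List.pyRange 1 (max_n+1) 1).map (fun n =>
    (n, PySem.List.pyGetD M (n+1) 0 - PySem.List.pyGetD M n 0))

-- ===== PORT B =====
-- Transliteration of Source B: one pass, state (res, a, b) = (dict so far, M(n-1), M(n)).
def motzkin_differences_alt (max_n : Int) : List (Int × Int) :=
  let st := (PySem.List.pyRange 1 (max_n+1) 1).foldl
    (fun (st : List (Int × Int) × Int × Int) n =>
      let c := PySem.Int.floordiv ((2*n+3)*st.2.2 + 3*n*st.2.1) (n+3)
      (st.1 ++ [(n, c - st.2.2)], st.2.2, c))
    ([], 1, 1)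
  st.1

-- ===== PRECONDITION & SPEC =====
-- Pre_ excludes exactly the inputs where A raises IndexError: those where the
-- preallocated table [0]*(max_n+5) has fewer than two cells, so that the
-- assignments M[0]=1 and M[1]=1 fall outside it.
def Pre_motzkin_differences (max_n : Int) : Prop := -3 ≤ max_n
instance (max_n : Int) : Decidable (Pre_motzkin_differences max_n) := by unfold Pre_motzkin_differences; infer_instance
def pvWitness_motzkin_differences : Int := (6)

def Spec_motzkin_differences (max_n : Int) (out : List (Int × Int)) : Prop := out = motzkin_differences_alt max_n
instance (max_n : Int) (out : List (Int × Int)) : Decidable (Spec_motzkin_differences max_n out) := by unfold Spec_motzkin_differences; infer_instance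

-- ===== CLAIM (what is proved, stated in full; the proofs are below) =====
def Claim_equal_motzkin_differences : Prop := ∀ (max_n : Int), Dom_motzkin_differences max_n → Pre_motzkin_differences max_n → Spec_motzkin_differences max_n (motzkin_differences max_n)

-- ===== LEMMAS AND PROOFS =====

def mzNext (l : List Int) : Int :=
  l.getD (l.length - 1) 0 +
    ((List.range (l.length - 1)).map (fun k => l.getD k 0 * l.getD (l.length - 2 - k) 0)).sum
def mzL : Nat → List Int
  | 0 => [1]
  | n+1 => mzL n ++ [mzNext (mzL n)]
def Mz (n : Nat) : Int := (mzL n).getD n 0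
theorem length_mzL (n : Nat) : (mzL n).length = n + 1 := by
  induction n with
  | zero => rfl
  | succ n ih => simp [mzL, ih]
theorem mzL_getD (n k : Nat) (h : k ≤ n) : (mzL n).getD k 0 = Mz k := by
  induction n with
  | zero => interval_cases k; rfl
  | succ n ih =>
    rcases Nat.lt_or_ge k (n+1) with h' | h'
    · rw [show mzL (n+1) = mzL n ++ [mzNext (mzL n)] from rfl,
        List.getD_append _ _ _ _ (by rw [length_mzL]; omega)]
      exact ih (by omega)
    · have : k = n + 1 := by omega
      subst this; rfl

theorem Mz_rec (n : Nat) :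
    Mz (n+2) = Mz (n+1) + ∑ k ∈ Finset.range (n+1), Mz k * Mz (n-k) := by
  have h1 : Mz (n+2) = mzNext (mzL (n+1)) := by
    show (mzL (n+1) ++ [mzNext (mzL (n+1))]).getD (n+2) 0 = _
    rw [List.getD_append_right _ _ _ _ (by rw [length_mzL]), length_mzL]
    simp
  rw [h1]
  unfold mzNext
  rw [length_mzL]
  have h2 : ∀ k ≤ n + 1, (mzL (n+1)).getD k 0 = Mz k := fun k hk => mzL_getD _ _ hk
  rw [show n + 1 + 1 - 1 = n + 1 from rfl, h2 (n+1) le_rfl]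
  congr 1
  have hr : ∑ k ∈ Finset.range (n+1), Mz k * Mz (n-k)
      = ((List.range (n+1)).map (fun k => Mz k * Mz (n-k))).sum := rfl
  rw [hr]
  congr 1
  apply List.map_congr_left
  intro k hk
  simp only [List.mem_range] at hk
  rw [h2 k (by omega), show n + 1 + 1 - 2 - k = n - k from by omega, h2 (n-k) (by omega)]

theorem Mz_zero : Mz 0 = 1 := rfl
theorem Mz_one : Mz 1 = 1 := rfl

-- Generating function of the Motzkin numbers, used to derive the linear recurrence.
noncomputable def Fmz : PowerSeries ℚ := PowerSeries.mk (fun n => (Mz n : ℚ))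

theorem coeff_Fmz (n : Nat) : PowerSeries.coeff n Fmz = (Mz n : ℚ) := by simp [Fmz]

theorem coeff_Fmz_sq (n : Nat) :
    PowerSeries.coeff n (Fmz^2) = ∑ k ∈ Finset.range (n+1), (Mz k : ℚ) * (Mz (n-k) : ℚ) := by
  rw [sq, PowerSeries.coeff_mul, Finset.Nat.sum_antidiagonal_eq_sum_range_succ_mk]
  simp [coeff_Fmz]

-- F = 1 + X·F + X²·F² (A's convolution recurrence, coefficient-wise)
theorem Fmz_quad : PowerSeries.X^2 * Fmz^2 + PowerSeries.X * Fmz + 1 = Fmz := by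
  ext n
  rcases n with _ | _ | m
  · simp [coeff_Fmz, Mz_zero]
  · simp only [map_add, PowerSeries.coeff_one, PowerSeries.coeff_succ_X_mul, coeff_Fmz]
    rw [PowerSeries.coeff_X_pow_mul']
    simp [Mz_zero, Mz_one]
  · simp only [map_add, PowerSeries.coeff_one]
    rw [show m + 1 + 1 = m + 2 from rfl, PowerSeries.coeff_X_pow_mul, PowerSeries.coeff_succ_X_mul,
      coeff_Fmz_sq, coeff_Fmz, coeff_Fmz]
    rw [Mz_rec m]
    push_cast
    simp [add_comm]

theorem derivFun_X : PowerSeries.derivativeFun (PowerSeries.X : PowerSeries ℚ) = 1 := by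
  ext n
  rw [PowerSeries.coeff_derivativeFun]
  rcases n with _ | m
  · simp
  · simp [PowerSeries.coeff_X, PowerSeries.coeff_one]

-- derivative of the quadratic equation
theorem Fmz_deriv :
    2*PowerSeries.X^2*Fmz*(PowerSeries.derivativeFun Fmz) + 2*PowerSeries.X*Fmz^2 +
      PowerSeries.X*(PowerSeries.derivativeFun Fmz) + Fmz = PowerSeries.derivativeFun Fmz := by
  have h := congrArg PowerSeries.derivativeFun Fmz_quad
  rw [PowerSeries.derivativeFun_add, PowerSeries.derivativeFun_add,
    PowerSeries.derivativeFun_one, PowerSeries.derivativeFun_mul,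
    PowerSeries.derivativeFun_mul, sq, sq,
    PowerSeries.derivativeFun_mul, PowerSeries.derivativeFun_mul, derivFun_X] at h
  simp only [smul_eq_mul] at h
  linear_combination h

-- (1-2X-3X²)·X·F' = (3X²+3X-2)·F + 2, eliminating F'² and F² via the two equations above
theorem Fmz_key :
    (1 - 2*PowerSeries.X - 3*PowerSeries.X^2) * (PowerSeries.X * PowerSeries.derivativeFun Fmz)
      = (3*PowerSeries.X^2 + 3*PowerSeries.X - 2) * Fmz + 2 := by
  linear_combination (-4*PowerSeries.X^2*Fmz - 2 - 4*PowerSeries.X^3*(PowerSeries.derivativeFun Fmz)) * Fmz_quad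
    + (PowerSeries.X*(2*PowerSeries.X^2*Fmz + PowerSeries.X - 1)) * Fmz_deriv

theorem coeff_XdF (n : Nat) :
    PowerSeries.coeff n (PowerSeries.X * PowerSeries.derivativeFun Fmz) = (n : ℚ) * Mz n := by
  rcases n with _ | m
  · simp [PowerSeries.coeff_zero_X_mul]
  · rw [PowerSeries.coeff_succ_X_mul, PowerSeries.coeff_derivativeFun, coeff_Fmz]
    push_cast; ring

-- The linear three-term Motzkin recurrence, extracted coefficient-wise from Fmz_key.
theorem Mz_linear (m : Nat) :
    ((m:Int)+4) * Mz (m+2) = (2*(m:Int)+5) * Mz (m+1) + (3*(m:Int)+3) * Mz m := by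
  have h2 : (PowerSeries.X * PowerSeries.derivativeFun Fmz)
      - PowerSeries.C (2:ℚ) * (PowerSeries.X * (PowerSeries.X * PowerSeries.derivativeFun Fmz))
      - PowerSeries.C (3:ℚ) * (PowerSeries.X^2 * (PowerSeries.X * PowerSeries.derivativeFun Fmz))
      = PowerSeries.C (3:ℚ) * (PowerSeries.X^2 * Fmz) + PowerSeries.C (3:ℚ) * (PowerSeries.X * Fmz)
        - PowerSeries.C (2:ℚ) * Fmz + PowerSeries.C (2:ℚ) * 1 := by
    have hc2 : PowerSeries.C (2:ℚ) = (2 : PowerSeries ℚ) := by simp [map_ofNat]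
    have hc3 : PowerSeries.C (3:ℚ) = (3 : PowerSeries ℚ) := by simp [map_ofNat]
    rw [hc2, hc3]
    linear_combination Fmz_key
  have h3 := congrArg (PowerSeries.coeff (m+2)) h2
  simp only [map_sub, map_add, PowerSeries.coeff_C_mul, mul_one] at h3
  have hA : PowerSeries.coeff (m+2) (PowerSeries.X * PowerSeries.derivativeFun Fmz)
      = ((m:ℚ)+2) * Mz (m+2) := by rw [coeff_XdF]; push_cast; ring
  have hB : PowerSeries.coeff (m+2) (PowerSeries.X * (PowerSeries.X * PowerSeries.derivativeFun Fmz))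
      = ((m:ℚ)+1) * Mz (m+1) := by
    rw [show m+2 = (m+1)+1 from rfl, PowerSeries.coeff_succ_X_mul, coeff_XdF]; push_cast; ring
  have hC : PowerSeries.coeff (m+2) (PowerSeries.X^2 * (PowerSeries.X * PowerSeries.derivativeFun Fmz))
      = (m:ℚ) * Mz m := by rw [PowerSeries.coeff_X_pow_mul, coeff_XdF]
  have hD2 : PowerSeries.coeff (m+2) (PowerSeries.X^2 * Fmz) = (Mz m : ℚ) := by
    rw [PowerSeries.coeff_X_pow_mul, coeff_Fmz]
  have hE : PowerSeries.coeff (m+2) (PowerSeries.X * Fmz) = (Mz (m+1) : ℚ) := by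
    rw [show m+2 = (m+1)+1 from rfl, PowerSeries.coeff_succ_X_mul, coeff_Fmz]
  have hF2 : PowerSeries.coeff (m+2) Fmz = (Mz (m+2) : ℚ) := coeff_Fmz (m+2)
  have hG : PowerSeries.coeff (m+2) (PowerSeries.C (2:ℚ)) = 0 := by
    simp
  rw [hA, hB, hC, hD2, hE, hF2, hG] at h3
  have h4 : ((m:ℚ)+4) * Mz (m+2) = (2*(m:ℚ)+5) * Mz (m+1) + (3*(m:ℚ)+3) * Mz m := by
    linear_combination h3
  exact_mod_cast h4

-- one step of B computes Mz (n+1) exactly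
theorem b_step (n : Nat) (hn : 1 ≤ n) :
    PySem.Int.floordiv ((2*(n:Int)+3)*(Mz n) + 3*(n:Int)*(Mz (n-1))) ((n:Int)+3) = Mz (n+1) := by
  obtain ⟨m, rfl⟩ : ∃ m, n = m + 1 := ⟨n-1, by omega⟩
  have hlin := Mz_linear m
  rw [show (m+1-1 : Nat) = m from rfl]
  rw [show ((m+1:Nat):Int) = (m:Int)+1 from by omega]
  have hnum : (2*((m:Int)+1)+3)*(Mz (m+1)) + 3*((m:Int)+1)*(Mz m) = (((m:Int)+1)+3) * Mz (m+2) := by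
    push_cast; linarith
  rw [hnum, PySem.Int.floordiv_eq_ediv_of_pos (by omega), mul_comm,
    Int.mul_ediv_cancel _ (by omega)]

theorem b_loop (max_n : Int) (t : Nat) (ht : (t:Int) ≤ max_n) :
    (PySem.List.pyRange 1 ((t:Int)+1) 1).foldl
      (fun (st : List (Int × Int) × Int × Int) n =>
        let c := PySem.Int.floordiv ((2*n+3)*st.2.2 + 3*n*st.2.1) (n+3)
        (st.1 ++ [(n, c - st.2.2)], st.2.2, c))
      ([], 1, 1)
    = ((PySem.List.pyRange 1 ((t:Int)+1) 1).map
        (fun n => (n, Mz (n.toNat+1) - Mz n.toNat)), Mz t, Mz (t+1)) := by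
  induction t with
  | zero =>
    rw [PySem.List.pyRange_one_eq_nil (by omega)]
    simp [Mz_zero, Mz_one]
  | succ t ih =>
    have h1 : ((t:Int)+1+1) = ((t:Int)+1) + 1 := rfl
    rw [show ((t+1:Nat):Int) = (t:Int)+1 from by omega]
    rw [h1, PySem.List.pyRange_one_succ_right (by omega), List.foldl_append, List.map_append,
      ih (by omega)]
    simp only [List.foldl_cons, List.foldl_nil, List.map_cons, List.map_nil]
    have hs : ((t:Int)+1).toNat = t + 1 := by omega
    have hb := b_step (t+1) (by omega)
    rw [show ((t+1:Nat):Int) = (t:Int)+1 from by omega] at hb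
    rw [show (t+1-1 : Nat) = t from rfl] at hb
    simp only [hs, hb]

theorem b_spec (max_n : Int) (h : 0 ≤ max_n) :
    motzkin_differences_alt max_n
    = (PySem.List.pyRange 1 (max_n+1) 1).map (fun n => (n, Mz (n.toNat+1) - Mz n.toNat)) := by
  unfold motzkin_differences_alt
  obtain ⟨t, rfl⟩ : ∃ t : Nat, max_n = (t:Int) := ⟨max_n.toNat, by omega⟩
  rw [b_loop _ t le_rfl]

-- the table after the first i cells have been filled
def stateL (nn i : Nat) : List Int := (List.range nn).map (fun j => if j < i then Mz j else 0)

theorem getD_stateL (nn i j : Nat) : (stateL nn i).getD j 0 = if j < nn then (if j < i then Mz j else 0) else 0 := by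
  unfold stateL
  rcases Nat.lt_or_ge j nn with h | h
  · rw [List.getD_eq_getElem _ _ (by simpa using h)]
    simp [h]
  · rw [List.getD_eq_default _ _ (by simpa using h)]
    simp; omega

theorem stateL_init (nn : Nat) :
    PySem.List.pySetD (PySem.List.pySetD (List.replicate nn (0:Int)) 0 1) 1 1 = stateL nn 2 := by
  rw [show (0:Int) = ((0:Nat):Int) from rfl, show (1:Int) = ((1:Nat):Int) from rfl,
    PySem.List.pySetD_natCast, PySem.List.pySetD_natCast]
  apply List.ext_getElem
  · simp [stateL]
  · intro j hj1 hj2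
    simp only [stateL, List.getElem_set, List.getElem_map, List.getElem_range,
      List.getElem_replicate]
    simp only [List.length_set, List.length_replicate] at hj1
    rcases j with _ | _ | j
    · simp [Mz_zero]
    · simp [Mz_one]
    · simp

theorem a_step (nn i : Nat) (h2 : 2 ≤ i) (hi : i < nn) :
    PySem.List.pySetD (stateL nn i) (i:Int)
        (PySem.List.pyGetD (stateL nn i) ((i:Int)-1) 0 +
          (PySem.List.pyRange 0 ((i:Int)-1) 1).foldl
            (fun s k => s + PySem.List.pyGetD (stateL nn i) k 0 * PySem.List.pyGetD (stateL nn i) ((i:Int)-2-k) 0) 0)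
      = stateL nn (i+1) := by
  have hval : PySem.List.pyGetD (stateL nn i) ((i:Int)-1) 0 +
      (PySem.List.pyRange 0 ((i:Int)-1) 1).foldl
        (fun s k => s + PySem.List.pyGetD (stateL nn i) k 0 * PySem.List.pyGetD (stateL nn i) ((i:Int)-2-k) 0) 0
      = Mz i := by
    obtain ⟨p, rfl⟩ : ∃ p, i = p + 2 := ⟨i-2, by omega⟩
    have hg1 : PySem.List.pyGetD (stateL nn (p+2)) (((p+2:Nat):Int)-1) 0 = Mz (p+1) := by
      rw [show ((p+2:Nat):Int)-1 = ((p+1:Nat):Int) from by omega, PySem.List.pyGetD_natCast,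
        getD_stateL, if_pos (by omega), if_pos (by omega)]
    rw [hg1, PySem.List.foldl_add]
    rw [show ((p+2:Nat):Int)-1 = ((p+1:Nat):Int) from by omega, PySem.List.pyRange_zero_natCast]
    rw [List.map_map]
    have hmap : ∀ k ∈ List.range (p+1),
        ((fun k => PySem.List.pyGetD (stateL nn (p+2)) k 0 *
            PySem.List.pyGetD (stateL nn (p+2)) (((p+2:Nat):Int)-2-k) 0) ∘ (fun n : Nat => (n:Int))) k
          = Mz k * Mz (p-k) := by
      intro k hk
      simp only [List.mem_range] at hk
      simp only [Function.comp]
      rw [PySem.List.pyGetD_natCast, getD_stateL, if_pos (by omega), if_pos (by omega),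
        show ((p+2:Nat):Int)-2-(k:Int) = ((p-k:Nat):Int) from by omega,
        PySem.List.pyGetD_natCast, getD_stateL, if_pos (by omega), if_pos (by omega)]
    rw [List.map_congr_left hmap]
    have := Mz_rec p
    rw [show (∑ k ∈ Finset.range (p+1), Mz k * Mz (p-k))
        = ((List.range (p+1)).map (fun k => Mz k * Mz (p-k))).sum from rfl] at this
    omega
  rw [hval, show (i:Int) = ((i:Nat):Int) from rfl, PySem.List.pySetD_natCast]
  apply List.ext_getElem
  · simp [stateL]
  · intro j hj1 hj2
    simp only [stateL, List.getElem_set, List.getElem_map, List.getElem_range]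
    split_ifs with ha hb hc hd he <;> first | rfl | omega | (subst ha; rfl)

theorem a_loop (nn : Nat) (h2 : 2 ≤ nn) (t : Nat) (ht : 2 + t ≤ nn) :
    (PySem.List.pyRange 2 (2+(t:Int)) 1).foldl (fun M i =>
      PySem.List.pySetD M i
        (PySem.List.pyGetD M (i-1) 0 +
          (PySem.List.pyRange 0 (i-1) 1).foldl
            (fun s k => s + PySem.List.pyGetD M k 0 * PySem.List.pyGetD M (i-2-k) 0) 0))
      (stateL nn 2)
    = stateL nn (2+t) := by
  induction t with
  | zero => rw [PySem.List.pyRange_one_eq_nil (by omega)]; rfl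
  | succ t ih =>
    rw [show 2+((t+1:Nat):Int) = (2+(t:Int)) + 1 from by omega,
      PySem.List.pyRange_one_succ_right (by omega), List.foldl_append, ih (by omega)]
    simp only [List.foldl_cons, List.foldl_nil]
    have := a_step nn (2+t) (by omega) (by omega)
    rw [show ((2+t : Nat):Int) = 2+(t:Int) from by omega] at this
    rw [this, show 2+t+1 = 2+(t+1) from rfl]

theorem a_spec (max_n : Int) (h : -3 ≤ max_n) :
    motzkin_differences max_n
    = (PySem.List.pyRange 1 (max_n+1) 1).map (fun n => (n, Mz (n.toNat+1) - Mz n.toNat)) := by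
  simp only [motzkin_differences]
  set nn : Nat := (max_n + 5).toNat with hnn
  have h2 : 2 ≤ nn := by omega
  have hN : max_n + 5 = ((nn : Nat) : Int) := by omega
  rw [hN, stateL_init nn, show ((nn:Nat):Int) = 2 + ((nn-2 : Nat):Int) from by omega,
    a_loop nn h2 (nn-2) (by omega), show 2+(nn-2) = nn from by omega]
  apply List.map_congr_left
  intro n hn
  rw [PySem.List.mem_pyRange_one] at hn
  rw [show n+1 = ((n.toNat+1 : Nat):Int) from by omega, PySem.List.pyGetD_natCast,
    show n = ((n.toNat : Nat):Int) from by omega, PySem.List.pyGetD_natCast,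
    getD_stateL, getD_stateL, if_pos (by omega), if_pos (by omega),
    if_pos (by omega), if_pos (by omega)]
  simp
  rw [show max n 0 = n from by omega]

-- ===== VERDICT (by name: the statement is the Claim_ definition above) =====
theorem motzkin_differences_spec : Claim_equal_motzkin_differences := by
  intro max_n _ hpre
  unfold Pre_motzkin_differences at hpre
  unfold Spec_motzkin_differences
  rw [a_spec max_n hpre]
  rcases Int.lt_or_le max_n 0 with hneg | hpos
  · rw [PySem.List.pyRange_one_eq_nil (by omega)]
    simp only [motzkin_differences_alt]
    rw [PySem.List.pyRange_one_eq_nil (by omega)]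
    simp
  · rw [b_spec max_n hpos]
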